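-- pv_equiv track=rewrite | github.com/killakeegs/agency-ai-workflow | scripts/visual/generate_sitemap_visual.py | _page_emoji
-- ===== SOURCE A (Python) =====
-- def _page_emoji(page: dict) -> str:
--     slug = page.get("slug", "")
--     title = page.get("title", "").lower()
--     if slug in ("/", "") or "home" in title:    return "🏠"
--     if page.get("page_type") == "CMS":          return "🗄️"
--     if "blog" in title:                         return "📝"
--     if "about" in title:                        return "👋"
--     if "contact" in title:                      return "📞"
--     if any(w in title for w in ("therapy", "service", "treatment")): return "🩺"
--     if any(w in title for w in ("location", "clinic", "frisco", "mckinney")): return "📍"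
--     if any(w in title for w in ("privacy", "terms", "legal", "accessib")): return "⚖️"
--     return "📄"
-- ===== SOURCE B (Python) =====
-- # Flat keyword->priority map; collect priorities of all matching keywords in one
-- # comprehension, then pick the emoji of the smallest matched priority.
-- _KW_PRI = {
--     "blog": 0, "about": 1, "contact": 2,
--     "therapy": 3, "service": 3, "treatment": 3,
--     "location": 4, "clinic": 4, "frisco": 4, "mckinney": 4,
--     "privacy": 5, "terms": 5, "legal": 5, "accessib": 5,
-- }
-- _EMOJI = ["📝", "👋", "📞", "🩺", "📍", "⚖️"]
--
--
-- def _page_emoji(page: dict) -> str: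
--     slug = page.get("slug", "")
--     title = page.get("title", "").lower()
--     if slug in ("/", "") or "home" in title:
--         return "🏠"
--     if page.get("page_type") == "CMS":
--         return "🗄️"
--     pris = [p for w, p in _KW_PRI.items() if w in title]
--     if not pris:
--         return "📄"
--     return _EMOJI[min(pris)]
-- ===== Notes on version B (the rewrite author's own statement) =====
-- stated objective: alternative
-- what changed: Instead of an ordered chain of early-return keyword checks, B uses a flat keyword->priority map, collects the priorities of ALL keywords occurring in the title in one comprehension, and returns the emoji indexed by the minimum matched priority (no early exit, no per-category branches).
import Mathlib
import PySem

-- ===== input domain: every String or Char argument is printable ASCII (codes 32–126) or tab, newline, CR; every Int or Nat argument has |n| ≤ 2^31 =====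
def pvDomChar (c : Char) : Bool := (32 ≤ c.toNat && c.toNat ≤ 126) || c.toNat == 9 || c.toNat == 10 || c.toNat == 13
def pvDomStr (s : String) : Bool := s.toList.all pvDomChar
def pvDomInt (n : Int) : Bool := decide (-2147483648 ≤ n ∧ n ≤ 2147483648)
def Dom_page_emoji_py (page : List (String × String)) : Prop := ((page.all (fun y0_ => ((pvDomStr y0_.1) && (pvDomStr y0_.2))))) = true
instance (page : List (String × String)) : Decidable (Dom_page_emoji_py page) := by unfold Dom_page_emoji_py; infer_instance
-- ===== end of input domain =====

-- B replaces A's ordered early-return keyword chain by a flat keyword->priority map: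
-- it collects the priorities of ALL keywords occurring in the title and returns the
-- emoji indexed by the minimum matched priority (alternative decomposition; same cost).

-- ===== PORT A =====
def page_emoji_py (page : List (String × String)) : String :=
  let d := PySem.Dict.mk page
  let slug := d.getD "slug" ""
  let title := PySem.Str.lower (d.getD "title" "")
  if slug = "/" ∨ slug = "" ∨ PySem.Str.isIn "home" title then "🏠"
  else if d.get? "page_type" = some "CMS" then "🗄️"
  else if PySem.Str.isIn "blog" title then "📝"
  else if PySem.Str.isIn "about" title then "👋"
  else if PySem.Str.isIn "contact" title then "📞"
  else if (["therapy", "service", "treatment"] : List String).any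
      (fun w => PySem.Str.isIn w title) then "🩺"
  else if (["location", "clinic", "frisco", "mckinney"] : List String).any
      (fun w => PySem.Str.isIn w title) then "📍"
  else if (["privacy", "terms", "legal", "accessib"] : List String).any
      (fun w => PySem.Str.isIn w title) then "⚖️"
  else "📄"

-- ===== PORT B =====
-- the dict _KW_PRI as an association list in insertion order (its .items() iteration)
def pvKwPri : List (String × Int) :=
  [ ("blog", 0), ("about", 1), ("contact", 2)
  , ("therapy", 3), ("service", 3), ("treatment", 3)
  , ("location", 4), ("clinic", 4), ("frisco", 4), ("mckinney", 4)
  , ("privacy", 5), ("terms", 5), ("legal", 5), ("accessib", 5) ]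

def pvEmoji : List String := ["📝", "👋", "📞", "🩺", "📍", "⚖️"]

def page_emoji_py_alt (page : List (String × String)) : String :=
  let d := PySem.Dict.mk page
  let slug := d.getD "slug" ""
  let title := PySem.Str.lower (d.getD "title" "")
  if slug = "/" ∨ slug = "" ∨ PySem.Str.isIn "home" title then "🏠"
  else if d.get? "page_type" = some "CMS" then "🗄️"
  else
    -- pris = [p for w, p in _KW_PRI.items() if w in title]
    let pris := (pvKwPri.filter (fun e => PySem.Str.isIn e.1 title)).map (fun e => e.2)
    match PySem.List.min? pris (fun x => x) with
    | none => "📄"                                   -- if not pris: return "📄"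
    | some p => (PySem.List.pyGet? pvEmoji p).getD "📄"  -- _EMOJI[min(pris)]; index always 0..5, default never used

-- ===== PRECONDITION & SPEC =====
def Spec_page_emoji_py (page : List (String × String)) (out : String) : Prop := out = page_emoji_py_alt page
instance (page : List (String × String)) (out : String) : Decidable (Spec_page_emoji_py page out) := by unfold Spec_page_emoji_py; infer_instance

-- ===== CLAIM (what is proved, stated in full; the proofs are below) =====
def Claim_equal_page_emoji_py : Prop := ∀ (page : List (String × String)), Dom_page_emoji_py page → Spec_page_emoji_py page (page_emoji_py page)

-- ===== LEMMAS AND PROOFS =====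
-- the keyword tails of A and B, abstracted over the 14 "keyword in title" booleans
def pvTailA (b1 b2 b3 b4 b5 b6 b7 b8 b9 b10 b11 b12 b13 b14 : Bool) : String :=
  if b1 then "📝" else if b2 then "👋" else if b3 then "📞"
  else if b4 || b5 || b6 then "🩺"
  else if b7 || b8 || b9 || b10 then "📍"
  else if b11 || b12 || b13 || b14 then "⚖️" else "📄"

def pvTailB (b1 b2 b3 b4 b5 b6 b7 b8 b9 b10 b11 b12 b13 b14 : Bool) : String :=
  let pris := (([(b1,(0:Int)),(b2,1),(b3,2),(b4,3),(b5,3),(b6,3),(b7,4),(b8,4),(b9,4),(b10,4),(b11,5),(b12,5),(b13,5),(b14,5)].filter (fun e => e.1)).map (fun e => e.2))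
  match PySem.List.min? pris (fun x => x) with
  | none => "📄"
  | some p => (PySem.List.pyGet? pvEmoji p).getD "📄"

theorem pvTail_eq_bool : ∀ b1 b2 b3 b4 b5 b6 b7 b8 b9 b10 b11 b12 b13 b14 : Bool,
    pvTailA b1 b2 b3 b4 b5 b6 b7 b8 b9 b10 b11 b12 b13 b14
      = pvTailB b1 b2 b3 b4 b5 b6 b7 b8 b9 b10 b11 b12 b13 b14 := by decide

theorem pvCompose (P : String → Bool) : ∀ l : List (String × Int),
    ((l.filter (fun e => P e.1)).map (fun e => e.2))
      = (((l.map (fun e => (P e.1, e.2))).filter (fun e => e.1)).map (fun e => e.2)) := by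
  intro l
  induction l with
  | nil => simp
  | cons a t ih => by_cases h : P a.1 <;> simp [List.filter, h, ih]

theorem tail_eq (title : String) :
    (if PySem.Str.isIn "blog" title then "📝"
     else if PySem.Str.isIn "about" title then "👋"
     else if PySem.Str.isIn "contact" title then "📞"
     else if (["therapy", "service", "treatment"] : List String).any
         (fun w => PySem.Str.isIn w title) then "🩺"
     else if (["location", "clinic", "frisco", "mckinney"] : List String).any
         (fun w => PySem.Str.isIn w title) then "📍"
     else if (["privacy", "terms", "legal", "accessib"] : List String).any
         (fun w => PySem.Str.isIn w title) then "⚖️"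
     else "📄")
    = (let pris := (pvKwPri.filter (fun e => PySem.Str.isIn e.1 title)).map (fun e => e.2)
       match PySem.List.min? pris (fun x => x) with
       | none => "📄"
       | some p => (PySem.List.pyGet? pvEmoji p).getD "📄") := by
  have h := pvTail_eq_bool (PySem.Str.isIn "blog" title) (PySem.Str.isIn "about" title)
    (PySem.Str.isIn "contact" title) (PySem.Str.isIn "therapy" title)
    (PySem.Str.isIn "service" title) (PySem.Str.isIn "treatment" title)
    (PySem.Str.isIn "location" title) (PySem.Str.isIn "clinic" title)
    (PySem.Str.isIn "frisco" title) (PySem.Str.isIn "mckinney" title)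
    (PySem.Str.isIn "privacy" title) (PySem.Str.isIn "terms" title)
    (PySem.Str.isIn "legal" title) (PySem.Str.isIn "accessib" title)
  simp only [pvTailA, pvTailB] at h
  rw [pvCompose (fun w => PySem.Str.isIn w title) pvKwPri]
  simpa [pvKwPri, List.any, or_assoc] using h

-- ===== VERDICT (by name: the statement is the Claim_ definition above) =====
theorem page_emoji_py_spec : Claim_equal_page_emoji_py := by
  intro page _
  unfold Spec_page_emoji_py
  simp only [page_emoji_py, page_emoji_py_alt]
  rw [tail_eq]
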